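-- pv_equiv track=rewrite | github.com/jjjordan/docker-gen-cron | opt/lib/parser.py | take_fields
-- ===== SOURCE A (Python) =====
-- def take_fields(line, n):
--     """Splits the specified line into two pieces, with the first containing n fields.
--
--     Args:
--         line (str): A crontab line
--         n (int): The number of fields to return in the first half.
--
--     Returns:
--         str: The first n fields of line
--         str: The remainder of the line
--         bool: Whether at least n fields were found
--     """
--     line = line.lstrip()
--     i = 0
--     taken = 0
--     for _ in range(n):
--         last = i
--         # Read non-whitespace
--         while i < len(line) and not line[i].isspace():
--             i += 1
--         # Read whitespace
--         while i < len(line) and line[i].isspace():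
--             i += 1
--         if i > last:
--             taken += 1
--
--     return line[:i].rstrip(), line[i:], (taken == n)
-- ===== SOURCE B (Python) =====
-- def _runs(s):
--     """Maximal runs of characters with equal isspace()-ness, in order."""
--     runs = []
--     j = 0
--     while j < len(s):
--         k = j + 1
--         while k < len(s) and s[k].isspace() == s[j].isspace():
--             k += 1
--         runs.append(s[j:k])
--         j = k
--     return runs
--
--
-- def take_fields(line, n):
--     line = line.lstrip()
--     rest = _runs(line)
--     i = 0
--     count = 0
--     while count < n and rest:
--         i += len(rest[0])          # a non-space field
--         count += 1
--         if len(rest) > 1: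
--             i += len(rest[1])      # its trailing whitespace
--         rest = rest[2:]
--     return line[:i].rstrip(), line[i:], count == n
-- ===== Notes on version B (the rewrite author's own statement) =====
-- stated objective: alternative
-- what changed: Instead of A's per-field pair of index-advancing while loops driven by range(n), B first splits the lstripped line into maximal runs of equal isspace()-ness and then consumes the run list two runs (field + trailing whitespace) at a time, so the split point and field count come from run lengths.
import Mathlib
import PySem

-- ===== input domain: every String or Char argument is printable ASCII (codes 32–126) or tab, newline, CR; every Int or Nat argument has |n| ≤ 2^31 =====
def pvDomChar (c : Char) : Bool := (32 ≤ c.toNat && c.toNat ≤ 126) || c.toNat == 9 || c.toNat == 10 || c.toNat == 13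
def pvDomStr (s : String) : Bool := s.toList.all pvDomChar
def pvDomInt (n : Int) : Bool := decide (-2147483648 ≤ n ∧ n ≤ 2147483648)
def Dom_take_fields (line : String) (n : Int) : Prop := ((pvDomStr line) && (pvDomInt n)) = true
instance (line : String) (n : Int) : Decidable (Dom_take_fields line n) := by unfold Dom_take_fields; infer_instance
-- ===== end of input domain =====

-- B splits the lstripped line into maximal isspace-runs and consumes them pairwise,
-- instead of A's per-field index-advancing while loops; objective: alternative structure.


-- ===== PORT A =====
-- while i < len(s) and p(s[i]): i += 1   (A's two inner while loops, parametrised by the predicate)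
def pvScanA (p : Char → Bool) (s : List Char) (i : Nat) : Nat :=
  if h : i < s.length then
    if p s[i] then pvScanA p s (i + 1) else i
  else i
termination_by s.length - i

-- for _ in range(n): ...   (A's outer loop; fuel = remaining iterations)
def pvLoopA (s : List Char) (fuel : Nat) (i taken : Nat) : Nat × Nat :=
  match fuel with
  | 0 => (i, taken)
  | m + 1 =>
    let last := i
    let i1 := pvScanA (fun c => !(PySem.Chars.isspace c)) s i
    let i2 := pvScanA (fun c => PySem.Chars.isspace c) s i1
    pvLoopA s m i2 (if last < i2 then taken + 1 else taken)

def take_fields (line : String) (n : Int) : String × String × Bool :=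
  let s := (PySem.Str.lstrip line).toList
  let r := pvLoopA s n.toNat 0 0
  (String.ofList (PySem.Chars.rstrip (s.take r.1)), String.ofList (s.drop r.1), ((r.2 : Int) == n))

-- ===== PORT B =====
-- inner while of _runs: k += 1 while s[k].isspace() == s[j].isspace()
def pvRunEnd (s : List Char) (b : Bool) (k : Nat) : Nat :=
  if h : k < s.length then
    if PySem.Chars.isspace s[k] == b then pvRunEnd s b (k + 1) else k
  else k
termination_by s.length - k

theorem pvRunEnd_ge (s : List Char) (b : Bool) (k : Nat) : k ≤ pvRunEnd s b k := by
  fun_induction pvRunEnd s b k with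
  | case1 => omega
  | case2 => omega
  | case3 => omega

-- outer while of _runs, appending s[j:k] for each run
def pvRunsAux (s : List Char) (j : Nat) (acc : List (List Char)) : List (List Char) :=
  if h : j < s.length then
    let k := pvRunEnd s (PySem.Chars.isspace s[j]) (j + 1)
    pvRunsAux s k (acc ++ [(s.drop j).take (k - j)])
  else acc
termination_by s.length - j
decreasing_by
  have := pvRunEnd_ge s (PySem.Chars.isspace s[j]) (j + 1)
  omega

-- while count < n and rest: consume a field run and its trailing whitespace run
def pvLoopB (runs : List (List Char)) (fuel : Nat) (i cnt : Nat) : Nat × Nat :=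
  match fuel, runs with
  | 0, _ => (i, cnt)
  | _ + 1, [] => (i, cnt)
  | m + 1, r :: rest =>
    match rest with
    | [] => pvLoopB [] m (i + r.length) (cnt + 1)
    | sp :: rest' => pvLoopB rest' m (i + r.length + sp.length) (cnt + 1)

def take_fields_alt (line : String) (n : Int) : String × String × Bool :=
  let s := (PySem.Str.lstrip line).toList
  let runs := pvRunsAux s 0 []
  let r := pvLoopB runs n.toNat 0 0
  (String.ofList (PySem.Chars.rstrip (s.take r.1)), String.ofList (s.drop r.1), ((r.2 : Int) == n))

-- ===== PRECONDITION & SPEC =====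
def Spec_take_fields (line : String) (n : Int) (out : String × String × Bool) : Prop := out = take_fields_alt line n
instance (line : String) (n : Int) (out : String × String × Bool) : Decidable (Spec_take_fields line n out) := by unfold Spec_take_fields; infer_instance

-- ===== CLAIM (what is proved, stated in full; the proofs are below) =====
def Claim_equal_take_fields : Prop := ∀ (line : String) (n : Int), Dom_take_fields line n → Spec_take_fields line n (take_fields line n)

-- ===== LEMMAS AND PROOFS =====

-- proof-side spec of the run decomposition
def pvChunks (l : List Char) : List (List Char) :=
  match l with
  | [] => []
  | c :: t =>
    (c :: t.takeWhile (fun d => PySem.Chars.isspace d == PySem.Chars.isspace c)) ::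
      pvChunks (t.dropWhile (fun d => PySem.Chars.isspace d == PySem.Chars.isspace c))
termination_by l.length
decreasing_by
  simp only [List.length_cons]
  have := List.length_dropWhile_le (fun d => PySem.Chars.isspace d == PySem.Chars.isspace c) t
  omega

theorem pvTakeTakeWhile (p : Char → Bool) (l : List Char) :
    l.take (l.takeWhile p).length = l.takeWhile p :=
  (List.prefix_iff_eq_take.mp (List.takeWhile_prefix p)).symm

theorem pvDropTakeWhile (p : Char → Bool) (l : List Char) :
    l.drop (l.takeWhile p).length = l.dropWhile p := by
  induction l with
  | nil => simp
  | cons a t ih => by_cases hp : p a <;> simp [hp, ih]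

theorem pvHeadDropWhile (p : Char → Bool) (l : List Char) (c : Char)
    (h : (l.dropWhile p).head? = some c) : p c = false := by
  induction l with
  | nil => simp at h
  | cons a t ih =>
    by_cases hp : p a
    · exact ih (by simpa [hp] using h)
    · simp [List.dropWhile_cons, hp] at h; subst h; simpa using hp

theorem pvScanA_eq (p : Char → Bool) (s : List Char) (i : Nat) :
    pvScanA p s i = i + ((s.drop i).takeWhile p).length := by
  fun_induction pvScanA p s i with
  | case1 i h hp ih =>
    rw [ih, List.drop_eq_getElem_cons h, List.takeWhile_cons_of_pos hp]
    simp; omega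
  | case2 i h hp =>
    rw [List.drop_eq_getElem_cons h, List.takeWhile_cons_of_neg (by simpa using hp)]
    simp
  | case3 i h =>
    rw [List.drop_eq_nil_of_le (by omega)]
    simp

theorem pvRunEnd_eq (s : List Char) (b : Bool) (k : Nat) :
    pvRunEnd s b k = k + ((s.drop k).takeWhile (fun d => PySem.Chars.isspace d == b)).length := by
  fun_induction pvRunEnd s b k with
  | case1 k h hp ih =>
    rw [ih]
    have hcons : (s.drop k).takeWhile (fun d => PySem.Chars.isspace d == b)
        = s[k] :: ((s.drop (k + 1)).takeWhile (fun d => PySem.Chars.isspace d == b)) := by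
      rw [List.drop_eq_getElem_cons h, List.takeWhile_cons, if_pos hp]
    rw [hcons]; simp; omega
  | case2 k h hp =>
    have hcons : (s.drop k).takeWhile (fun d => PySem.Chars.isspace d == b) = [] := by
      rw [List.drop_eq_getElem_cons h, List.takeWhile_cons, if_neg (by simpa using hp)]
    rw [hcons]; simp
  | case3 k h =>
    rw [List.drop_eq_nil_of_le (by omega)]
    simp

theorem pvRunsAux_eq (s : List Char) (j : Nat) (acc : List (List Char)) :
    pvRunsAux s j acc = acc ++ pvChunks (s.drop j) := by
  fun_induction pvRunsAux s j acc with
  | case1 j acc h k ih =>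
    have hd : s.drop j = s[j] :: s.drop (j + 1) := List.drop_eq_getElem_cons h
    have hk : k = (j + 1) +
        ((s.drop (j + 1)).takeWhile (fun d => PySem.Chars.isspace d == PySem.Chars.isspace s[j])).length :=
      pvRunEnd_eq s (PySem.Chars.isspace s[j]) (j + 1)
    have hdropk : s.drop k =
        (s.drop (j + 1)).dropWhile (fun d => PySem.Chars.isspace d == PySem.Chars.isspace s[j]) := by
      rw [hk, ← List.drop_drop, pvDropTakeWhile]
    have htake : (s.drop j).take (k - j) =
        s[j] :: (s.drop (j + 1)).takeWhile (fun d => PySem.Chars.isspace d == PySem.Chars.isspace s[j]) := by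
      rw [hd, hk]
      have : (j + 1) + ((s.drop (j+1)).takeWhile (fun d => PySem.Chars.isspace d == PySem.Chars.isspace s[j])).length - j
          = ((s.drop (j+1)).takeWhile (fun d => PySem.Chars.isspace d == PySem.Chars.isspace s[j])).length + 1 := by omega
      rw [this, List.take_succ_cons, pvTakeTakeWhile]
    rw [ih, hdropk, htake]
    conv_rhs => rw [hd, pvChunks]
    simp

  | case2 j acc h =>
    rw [List.drop_eq_nil_of_le (by omega)]
    simp [pvChunks]

theorem pvLoopB_nil (m i cnt : Nat) : pvLoopB [] m i cnt = (i, cnt) := by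
  cases m <;> rfl

theorem pvLoopB_shift (runs : List (List Char)) (fuel : Nat) (i cnt : Nat) :
    pvLoopB runs fuel i cnt = (i + (pvLoopB runs fuel 0 0).1, cnt + (pvLoopB runs fuel 0 0).2) := by
  induction fuel generalizing runs i cnt with
  | zero => simp [pvLoopB]
  | succ m ih =>
    match runs with
    | [] => simp [pvLoopB]
    | [r] =>
      simp only [pvLoopB]
      rw [pvLoopB_nil, pvLoopB_nil]
      simp
    | r :: sp :: rest =>
      simp only [pvLoopB]
      rw [ih rest (i + r.length + sp.length) (cnt + 1), ih rest (0 + r.length + sp.length) (0 + 1)]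
      simp [Prod.ext_iff]; omega

theorem pvLoopA_nil (s : List Char) (fuel i taken : Nat) (h : s.drop i = []) :
    pvLoopA s fuel i taken = (i, taken) := by
  induction fuel with
  | zero => rfl
  | succ m ih =>
    simp only [pvLoopA, pvScanA_eq, h]
    simp [h]
    exact ih

theorem pvLoop_agree (fuel : Nat) (s : List Char) (i taken : Nat)
    (hinv : ∀ c, (s.drop i).head? = some c → PySem.Chars.isspace c = false) :
    pvLoopA s fuel i taken =
      (i + (pvLoopB (pvChunks (s.drop i)) fuel 0 0).1,
       taken + (pvLoopB (pvChunks (s.drop i)) fuel 0 0).2) := by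
  induction fuel generalizing i taken with
  | zero => simp [pvLoopA, pvLoopB]
  | succ m ih =>
    rcases hrem : s.drop i with _ | ⟨c, t⟩
    · rw [pvLoopA_nil s (m + 1) i taken hrem]
      simp [pvChunks, pvLoopB_nil]
    · have hc : PySem.Chars.isspace c = false := hinv c (by rw [hrem]; rfl)
      have hi : i < s.length := by
        by_contra hcon
        rw [List.drop_eq_nil_of_le (by omega)] at hrem
        simp at hrem
      have ht : s.drop (i + 1) = t := by
        have h2 : (c :: t : List Char) = s[i] :: s.drop (i + 1) := by
          rw [← hrem]; exact List.drop_eq_getElem_cons hi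
        injection h2 with _ h3
        exact h3.symm
      -- the field run
      have htw : ((s.drop i).takeWhile (fun d => !PySem.Chars.isspace d)) =
          c :: t.takeWhile (fun d => !PySem.Chars.isspace d) := by
        rw [hrem, List.takeWhile_cons_of_pos (by simp [hc])]
      have hq : (fun d => PySem.Chars.isspace d == PySem.Chars.isspace c) =
          (fun d => !PySem.Chars.isspace d) := by
        funext d; rw [hc]; cases PySem.Chars.isspace d <;> rfl
      have hchunks : pvChunks (c :: t) =
          (c :: t.takeWhile (fun d => !PySem.Chars.isspace d)) ::
            pvChunks (t.dropWhile (fun d => !PySem.Chars.isspace d)) := by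
        rw [pvChunks, hq]
      set tw := t.takeWhile (fun d => !PySem.Chars.isspace d) with htw_def
      set dw := t.dropWhile (fun d => !PySem.Chars.isspace d) with hdw_def
      have hi1 : pvScanA (fun d => !PySem.Chars.isspace d) s i = i + (1 + tw.length) := by
        rw [pvScanA_eq, htw]; simp; omega
      have hdropi1 : s.drop (i + (1 + tw.length)) = dw := by
        rw [show i + (1 + tw.length) = (i + 1) + tw.length by omega, ← List.drop_drop, ht,
            pvDropTakeWhile]
      rcases hdwc : dw with _ | ⟨d, t2⟩
      · -- no whitespace after the last field: scan 2 adds nothing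
        have hi2 : pvScanA (fun d => PySem.Chars.isspace d) s (i + (1 + tw.length)) = i + (1 + tw.length) := by
          rw [pvScanA_eq, hdropi1, hdwc]; simp
        simp only [pvLoopA, hi1, hi2]
        rw [if_pos (by omega)]
        rw [pvLoopA_nil s m _ _ (by rw [hdropi1, hdwc])]
        rw [hchunks, hdwc]
        simp only [pvChunks, pvLoopB]
        rw [pvLoopB_nil]
        simp; omega
      · have hd : PySem.Chars.isspace d = true := by
          have := pvHeadDropWhile (fun d => !PySem.Chars.isspace d) t d (by rw [← hdw_def, hdwc]; rfl)
          simpa using this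
        set sp := dw.takeWhile (fun d => PySem.Chars.isspace d) with hsp_def
        have hsp : sp = d :: t2.takeWhile (fun d => PySem.Chars.isspace d) := by
          rw [hsp_def, hdwc, List.takeWhile_cons_of_pos hd]
        have hi2 : pvScanA (fun d => PySem.Chars.isspace d) s (i + (1 + tw.length)) =
            i + (1 + tw.length) + sp.length := by
          rw [pvScanA_eq, hdropi1, hsp_def]
        have hdropi2 : s.drop (i + (1 + tw.length) + sp.length) =
            dw.dropWhile (fun d => PySem.Chars.isspace d) := by
          rw [← List.drop_drop, hdropi1, hsp_def, pvDropTakeWhile]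
        have hq2 : (fun x => PySem.Chars.isspace x == PySem.Chars.isspace d) =
            (fun x => PySem.Chars.isspace x) := by
          funext x; rw [hd]; cases PySem.Chars.isspace x <;> rfl
        have hchunks2 : pvChunks dw =
            sp :: pvChunks (dw.dropWhile (fun x => PySem.Chars.isspace x)) := by
          rw [hdwc, pvChunks, hq2, ← hsp, List.dropWhile_cons_of_pos hd]
        have hinv2 : ∀ e, ((s.drop (i + (1 + tw.length) + sp.length)).head? = some e) →
            PySem.Chars.isspace e = false := by
          intro e he
          rw [hdropi2] at he
          exact pvHeadDropWhile _ dw e he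
        simp only [pvLoopA, hi1, hi2]
        rw [if_pos (by omega)]
        rw [ih _ _ hinv2, hdropi2]
        rw [hchunks, hchunks2]
        simp only [pvLoopB]
        rw [pvLoopB_shift (pvChunks (dw.dropWhile (fun d => PySem.Chars.isspace d))) m
              (0 + (c :: tw).length + sp.length) (0 + 1)]
        simp [Prod.ext_iff]; omega

theorem pvChunks_runs (s : List Char) : pvRunsAux s 0 [] = pvChunks s := by
  simpa using pvRunsAux_eq s 0 []

-- ===== VERDICT (by name: the statement is the Claim_ definition above) =====
theorem take_fields_spec : Claim_equal_take_fields := by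
  intro line n _
  unfold Spec_take_fields take_fields take_fields_alt
  dsimp only
  rw [pvChunks_runs]
  have hls : (PySem.Str.lstrip line).toList = line.toList.dropWhile PySem.Chars.isspace := by
    simp [PySem.Str.lstrip, PySem.Chars.lstrip]
  have hinv : ∀ c, (((PySem.Str.lstrip line).toList).drop 0).head? = some c →
      PySem.Chars.isspace c = false := by
    intro c hc
    rw [List.drop_zero, hls] at hc
    exact pvHeadDropWhile _ _ _ hc
  have h := pvLoop_agree n.toNat (PySem.Str.lstrip line).toList 0 0 hinv
  rw [List.drop_zero] at h
  rw [h]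
  simp
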